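-- pv_equiv track=rewrite | github.com/arunprasad2002/DSA-Level-1 | stack/infix_conversion.py | infix_conversion
-- ===== SOURCE A (Python) =====
-- def precedence(operator):
--     if operator == '+' or operator == '-':
--         return 1
--     elif operator == '/' or operator == '*':
--         return 2
--     else:
--         return 0
--
-- def infix_conversion(expression):
--     postfix = []
--     prefix = []
--     operators = []
--
--     for char in expression:
--         if char == '(':
--             operators.append(char)
--         elif char.isdigit() or char.isalpha():
--             postfix.append(char)
--             prefix.append(char)
--         elif char == ")":
--             while operators[-1] != "(":
--                 operator = operators.pop()
--                 # process prefix
--                 b = prefix.pop()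
--                 a = prefix.pop()
--                 prefix_value = operator + a + b
--                 prefix.append(prefix_value)
--
--                 # process postfix
--                 b = postfix.pop()
--                 a = postfix.pop()
--                 postfix_value = a + b + operator
--                 postfix.append(postfix_value)
--             operators.pop() #Removing (
--         elif char in ['+', '-', '*', '/']:
--             while operators and char != '(' and precedence(char) <= precedence(operators[-1]):
--                 operator = operators.pop()
--                 # process prefix
--                 b = prefix.pop()
--                 a = prefix.pop()
--                 prefix_value = operator + a + b
--                 prefix.append(prefix_value)
--
--                 # process postfix
--                 b = postfix.pop()
--                 a = postfix.pop()
--                 postfix_value = a + b + operator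
--                 postfix.append(postfix_value)
--             operators.append(char)
--
--     while operators:
--                 operator = operators.pop()
--                 # process prefix
--                 b = prefix.pop()
--                 a = prefix.pop()
--                 prefix_value = operator + a + b
--                 prefix.append(prefix_value)
--
--                 # process postfix
--                 b = postfix.pop()
--                 a = postfix.pop()
--                 postfix_value = a + b + operator
--                 postfix.append(postfix_value)
--     return prefix[0], postfix[0]
-- ===== SOURCE B (Python) =====
-- def infix_conversion(expression):
--     # Build an expression tree with a shunting-yard loop, then derive the
--     # prefix/postfix strings by preorder/postorder traversals of the tree.
--     prec = {'+': 1, '-': 1, '*': 2, '/': 2}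
--     operators = []
--     nodes = []  # stack of trees: a bare char (leaf) or (op, left, right)
--
--     def reduce_top():
--         op = operators.pop()
--         b = nodes.pop()
--         a = nodes.pop()
--         nodes.append((op, a, b))
--
--     for char in expression:
--         if char == '(':
--             operators.append(char)
--         elif char.isdigit() or char.isalpha():
--             nodes.append(char)
--         elif char == ')':
--             while operators[-1] != '(':
--                 reduce_top()
--             operators.pop()
--         elif char in prec:
--             while operators and prec[char] <= prec.get(operators[-1], 0):
--                 reduce_top()
--             operators.append(char)
--
--     while operators:
--         reduce_top()
--
--     tree = nodes[0]
--
--     def pre(t):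
--         if isinstance(t, str):
--             return t
--         return t[0] + pre(t[1]) + pre(t[2])
--
--     def post(t):
--         if isinstance(t, str):
--             return t
--         return post(t[1]) + post(t[2]) + t[0]
--
--     return pre(tree), post(tree)
-- ===== Notes on version B (the rewrite author's own statement) =====
-- stated objective: alternative
-- what changed: B's shunting-yard loop maintains a single stack of expression-tree nodes instead of two parallel prefix/postfix string stacks, and the prefix/postfix strings are produced afterwards by separate preorder/postorder traversals of the resulting tree.
import Mathlib
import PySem

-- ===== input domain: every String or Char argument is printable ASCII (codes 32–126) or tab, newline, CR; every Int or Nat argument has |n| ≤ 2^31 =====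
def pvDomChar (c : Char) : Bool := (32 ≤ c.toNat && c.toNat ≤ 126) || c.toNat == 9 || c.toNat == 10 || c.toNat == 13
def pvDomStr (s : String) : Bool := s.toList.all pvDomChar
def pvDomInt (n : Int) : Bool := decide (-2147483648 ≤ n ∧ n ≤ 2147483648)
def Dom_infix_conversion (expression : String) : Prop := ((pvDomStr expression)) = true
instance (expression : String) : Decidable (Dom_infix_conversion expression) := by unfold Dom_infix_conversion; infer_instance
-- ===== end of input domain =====

-- B builds one stack of expression trees and derives prefix/postfix by separate
-- preorder/postorder traversals, instead of A's two inline string stacks (objective: alternative).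

-- ===== PORT A =====
-- Stacks are kept top-first (Python appends/pops at the end; here the head is the top),
-- so Python's prefix[0]/postfix[0] is the LAST element of the Lean list.
-- Char.isDigit/Char.isAlpha are exact for Python's str.isdigit/str.isalpha on the ASCII domain.
-- Where Python would raise (pop from an empty stack, prefix[0] on empty), the
-- helpers leave the stacks unchanged / return ""; Pre_ excludes exactly those inputs.
def pvPrecA (operator : Char) : Int :=
  if operator = '+' ∨ operator = '-' then 1
  else if operator = '/' ∨ operator = '*' then 2
  else 0

-- one reduction body of A: given the popped operator, rebuild the two string stacks
def pvReduceA (op : Char) : List String → List String → List String × List String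
  | b :: a :: pre, d :: c :: post =>
      ((String.singleton op ++ a ++ b) :: pre, (c ++ d ++ String.singleton op) :: post)
  | pre, post => (pre, post)

-- the `while operators[-1] != "(":` loop of the ')' branch (then pops the '(')
def pvDrainParenA : List Char → List String → List String → List Char × List String × List String
  | [], pre, post => ([], pre, post)
  | op :: ops, pre, post =>
      if op = '(' then (ops, pre, post)
      else
        let (pre', post') := pvReduceA op pre post
        pvDrainParenA ops pre' post'

-- the `while operators and char != '(' and precedence(char) <= precedence(operators[-1]):` loop
def pvDrainOpA (c : Char) : List Char → List String → List String → List Char × List String × List String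
  | [], pre, post => ([], pre, post)
  | op :: ops, pre, post =>
      if c ≠ '(' ∧ pvPrecA c ≤ pvPrecA op then
        let (pre', post') := pvReduceA op pre post
        pvDrainOpA c ops pre' post'
      else (op :: ops, pre, post)

-- the final `while operators:` loop
def pvDrainAllA : List Char → List String → List String → List String × List String
  | [], pre, post => (pre, post)
  | op :: ops, pre, post =>
      let (pre', post') := pvReduceA op pre post
      pvDrainAllA ops pre' post'

-- the `for char in expression:` loop
def pvLoopA : List Char → List Char → List String → List String → List Char × List String × List String
  | [], ops, pre, post => (ops, pre, post)
  | ch :: rest, ops, pre, post =>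
      if ch = '(' then pvLoopA rest (ch :: ops) pre post
      else if ch.isDigit ∨ ch.isAlpha then
        pvLoopA rest ops (String.singleton ch :: pre) (String.singleton ch :: post)
      else if ch = ')' then
        let (ops', pre', post') := pvDrainParenA ops pre post
        pvLoopA rest ops' pre' post'
      else if ch = '+' ∨ ch = '-' ∨ ch = '*' ∨ ch = '/' then
        let (ops', pre', post') := pvDrainOpA ch ops pre post
        pvLoopA rest (ch :: ops') pre' post'
      else pvLoopA rest ops pre post

def infix_conversion (expression : String) : String × String :=
  let (ops, pre, post) := pvLoopA expression.toList [] [] []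
  let (pre', post') := pvDrainAllA ops pre post
  (pre'.getLastD "", post'.getLastD "")

-- ===== PORT B =====
inductive ETree
  | leaf : Char → ETree
  | node : Char → ETree → ETree → ETree
deriving DecidableEq, Repr

-- the dict `prec = {'+': 1, '-': 1, '*': 2, '/': 2}` of Source B
def pvPrecDict : PySem.Dict Char Int := PySem.Dict.ofList [('+', 1), ('-', 1), ('*', 2), ('/', 2)]

-- reduce_top of Source B: pop two trees, push one internal node (unchanged on underflow; Pre_ excludes it)
def pvReduceB (op : Char) : List ETree → List ETree
  | b :: a :: st => ETree.node op a b :: st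
  | st => st

def pvDrainParenB : List Char → List ETree → List Char × List ETree
  | [], st => ([], st)
  | op :: ops, st =>
      if op = '(' then (ops, st)
      else pvDrainParenB ops (pvReduceB op st)

def pvDrainOpB (c : Char) : List Char → List ETree → List Char × List ETree
  | [], st => ([], st)
  | op :: ops, st =>
      if PySem.Dict.getD pvPrecDict c 0 ≤ PySem.Dict.getD pvPrecDict op 0 then
        pvDrainOpB c ops (pvReduceB op st)
      else (op :: ops, st)

def pvDrainAllB : List Char → List ETree → List ETree
  | [], st => st
  | op :: ops, st => pvDrainAllB ops (pvReduceB op st)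

def pvLoopB : List Char → List Char → List ETree → List Char × List ETree
  | [], ops, st => (ops, st)
  | ch :: rest, ops, st =>
      if ch = '(' then pvLoopB rest (ch :: ops) st
      else if ch.isDigit ∨ ch.isAlpha then pvLoopB rest ops (ETree.leaf ch :: st)
      else if ch = ')' then
        let (ops', st') := pvDrainParenB ops st
        pvLoopB rest ops' st'
      else if (PySem.Dict.get? pvPrecDict ch).isSome then
        let (ops', st') := pvDrainOpB ch ops st
        pvLoopB rest (ch :: ops') st'
      else pvLoopB rest ops st

-- preorder / postorder traversals of Source B
def pvPre : ETree → String
  | .leaf c => String.singleton c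
  | .node op a b => String.singleton op ++ pvPre a ++ pvPre b

def pvPost : ETree → String
  | .leaf c => String.singleton c
  | .node op a b => pvPost a ++ pvPost b ++ String.singleton op

def infix_conversion_alt (expression : String) : String × String :=
  let (ops, st) := pvLoopB expression.toList [] []
  let st' := pvDrainAllB ops st
  match st'.getLast? with      -- nodes[0] of Source B (stacks are top-first here)
  | some t => (pvPre t, pvPost t)
  | none => ("", "")

-- ===== PRECONDITION & SPEC =====
-- Pre_ holds exactly on the inputs where Python A returns normally: it tracks the
-- operator stack and the operand-stack SIZE only (no output is computed) and fails
-- precisely at A's raise points: a pop from an empty operand stack during a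
-- reduction, ')' with no '(' below, and prefix[0] on an empty operand stack.
-- These definitions are independent of both ports.
def pvSPrec (c : Char) : Int :=
  if c = '+' ∨ c = '-' then 1 else if c = '/' ∨ c = '*' then 2 else 0

def pvSReduce (n : Nat) : Option Nat := if 2 ≤ n then some (n - 1) else none

def pvSDrainParen : List Char → Nat → Option (List Char × Nat)
  | [], _ => none
  | op :: ops, n =>
      if op = '(' then some (ops, n)
      else (pvSReduce n).bind fun n' => pvSDrainParen ops n'

def pvSDrainOp (c : Char) : List Char → Nat → Option (List Char × Nat)
  | [], n => some ([], n)
  | op :: ops, n =>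
      if pvSPrec c ≤ pvSPrec op then (pvSReduce n).bind fun n' => pvSDrainOp c ops n'
      else some (op :: ops, n)

def pvSDrainAll : List Char → Nat → Option Nat
  | [], n => some n
  | _ :: ops, n => (pvSReduce n).bind fun n' => pvSDrainAll ops n'

def pvSLoop : List Char → List Char → Nat → Option (List Char × Nat)
  | [], ops, n => some (ops, n)
  | ch :: rest, ops, n =>
      if ch = '(' then pvSLoop rest (ch :: ops) n
      else if ch.isDigit ∨ ch.isAlpha then pvSLoop rest ops (n + 1)
      else if ch = ')' then (pvSDrainParen ops n).bind fun (ops', n') => pvSLoop rest ops' n'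
      else if ch = '+' ∨ ch = '-' ∨ ch = '*' ∨ ch = '/' then
        (pvSDrainOp ch ops n).bind fun (ops', n') => pvSLoop rest (ch :: ops') n'
      else pvSLoop rest ops n

def Pre_infix_conversion (expression : String) : Prop :=
  ((pvSLoop expression.toList [] 0).bind fun (ops, n) =>
    (pvSDrainAll ops n).map fun n' => decide (1 ≤ n')) = some true

instance (expression : String) : Decidable (Pre_infix_conversion expression) := by
  unfold Pre_infix_conversion; infer_instance

def pvWitness_infix_conversion : String := "a+b*(c-d)"

def Spec_infix_conversion (expression : String) (out : String × String) : Prop := out = infix_conversion_alt expression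
instance (expression : String) (out : String × String) : Decidable (Spec_infix_conversion expression out) := by unfold Spec_infix_conversion; infer_instance

-- ===== CLAIM (what is proved, stated in full; the proofs are below) =====
def Claim_equal_infix_conversion : Prop := ∀ (expression : String), Dom_infix_conversion expression → Pre_infix_conversion expression → Spec_infix_conversion expression (infix_conversion expression)

-- ===== LEMMAS AND PROOFS =====

theorem pvPrecDict_eq (c : Char) : PySem.Dict.getD pvPrecDict c 0 = pvPrecA c := by
  by_cases h1 : c = '+' <;> by_cases h2 : c = '-' <;> by_cases h3 : c = '*' <;>
    by_cases h4 : c = '/' <;>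
    simp_all [pvPrecDict, pvPrecA, PySem.Dict.ofList, PySem.Dict.update, PySem.Dict.getD_insert, PySem.Dict.getD_empty]

theorem pvReduce_sim (op : Char) (st : List ETree) :
    pvReduceA op (st.map pvPre) (st.map pvPost)
      = ((pvReduceB op st).map pvPre, (pvReduceB op st).map pvPost) := by
  match st with
  | [] => simp [pvReduceA, pvReduceB]
  | [a] => simp [pvReduceA, pvReduceB]
  | b :: a :: rest => simp [pvReduceA, pvReduceB, pvPre, pvPost]

theorem pvDrainParen_sim (ops : List Char) (st : List ETree) :
    pvDrainParenA ops (st.map pvPre) (st.map pvPost)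
      = ((pvDrainParenB ops st).1, (pvDrainParenB ops st).2.map pvPre,
         (pvDrainParenB ops st).2.map pvPost) := by
  induction ops generalizing st with
  | nil => simp [pvDrainParenA, pvDrainParenB]
  | cons op ops ih =>
      by_cases h : op = '('
      · simp [pvDrainParenA, pvDrainParenB, h]
      · simp [pvDrainParenA, pvDrainParenB, h, pvReduce_sim, ih]

theorem pvDrainOp_sim (c : Char) (hc : c ≠ '(') (ops : List Char) (st : List ETree) :
    pvDrainOpA c ops (st.map pvPre) (st.map pvPost)
      = ((pvDrainOpB c ops st).1, (pvDrainOpB c ops st).2.map pvPre,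
         (pvDrainOpB c ops st).2.map pvPost) := by
  induction ops generalizing st with
  | nil => simp [pvDrainOpA, pvDrainOpB]
  | cons op ops ih =>
      by_cases h : pvPrecA c ≤ pvPrecA op
      · simp [pvDrainOpA, pvDrainOpB, pvPrecDict_eq, h, hc, pvReduce_sim, ih]
      · simp [pvDrainOpA, pvDrainOpB, pvPrecDict_eq, h, hc]

theorem pvDrainAll_sim (ops : List Char) (st : List ETree) :
    pvDrainAllA ops (st.map pvPre) (st.map pvPost)
      = ((pvDrainAllB ops st).map pvPre, (pvDrainAllB ops st).map pvPost) := by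
  induction ops generalizing st with
  | nil => simp [pvDrainAllA, pvDrainAllB]
  | cons op ops ih => simp [pvDrainAllA, pvDrainAllB, pvReduce_sim, ih]

-- in A's operator branch, membership in pvPrecDict coincides with the list test
theorem pvDict_mem (c : Char) :
    (PySem.Dict.get? pvPrecDict c).isSome = (c = '+' ∨ c = '-' ∨ c = '*' ∨ c = '/' : Bool) := by
  by_cases h1 : c = '+' <;> by_cases h2 : c = '-' <;> by_cases h3 : c = '*' <;>
    by_cases h4 : c = '/' <;>
    simp_all [pvPrecDict, PySem.Dict.ofList, PySem.Dict.update, PySem.Dict.get?_insert, PySem.Dict.get?_empty]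

theorem pvLoop_sim (cs : List Char) (ops : List Char) (st : List ETree) :
    pvLoopA cs ops (st.map pvPre) (st.map pvPost)
      = ((pvLoopB cs ops st).1, (pvLoopB cs ops st).2.map pvPre,
         (pvLoopB cs ops st).2.map pvPost) := by
  induction cs generalizing ops st with
  | nil => simp [pvLoopA, pvLoopB]
  | cons ch rest ih =>
      by_cases h1 : ch = '('
      · simp [pvLoopA, pvLoopB, h1, ih]
      · by_cases h2 : ch.isDigit ∨ ch.isAlpha
        · have : pvLoopA (ch :: rest) ops (st.map pvPre) (st.map pvPost)
              = pvLoopA rest ops ((ETree.leaf ch :: st).map pvPre) ((ETree.leaf ch :: st).map pvPost) := by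
            simp [pvLoopA, h1, h2, pvPre, pvPost]
          rw [this, ih]
          simp [pvLoopB, h1, h2]
        · by_cases h3 : ch = ')'
          · have hd := pvDrainParen_sim ops st
            simp [pvLoopA, pvLoopB, h3, hd, ih]
          · by_cases h4 : ch = '+' ∨ ch = '-' ∨ ch = '*' ∨ ch = '/'
            · have hc : ch ≠ '(' := h1
              have hd := pvDrainOp_sim ch hc ops st
              simp [pvLoopA, pvLoopB, h1, h2, h3, h4, pvDict_mem, hd, ih]
            · simp [pvLoopA, pvLoopB, h1, h2, h3, h4, pvDict_mem, ih]

theorem pv_total_eq (expression : String) :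
    infix_conversion expression = infix_conversion_alt expression := by
  unfold infix_conversion infix_conversion_alt
  have h := pvLoop_sim expression.toList [] []
  simp only [List.map_nil] at h
  rw [h]
  have h2 := pvDrainAll_sim (pvLoopB expression.toList [] []).1 (pvLoopB expression.toList [] []).2
  simp only [h2]
  cases hl : (pvDrainAllB (pvLoopB expression.toList [] []).1 (pvLoopB expression.toList [] []).2).getLast? with
  | none =>
      have : pvDrainAllB (pvLoopB expression.toList [] []).1 (pvLoopB expression.toList [] []).2 = [] :=
        List.getLast?_eq_none_iff.mp hl
      simp [this, List.getLastD]
  | some t =>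
      simp [List.getLastD_eq_getLast?, List.getLast?_map, hl]

-- ===== VERDICT (by name: the statement is the Claim_ definition above) =====
theorem infix_conversion_spec : Claim_equal_infix_conversion := by
  intro expression _ _
  unfold Spec_infix_conversion
  exact pv_total_eq expression
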